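-- pv_equiv track=rewrite | github.com/miliar/Code_Jam_Webscraper | solutions_python/Problem_200/3320.py | solve
-- ===== SOURCE A (Python) =====
-- def solve(n):
--     n = [int(c) for c in str(n)]
--     l = len(n)
--     for i in range(1, l):
--         if n[i] < n[i-1]:
--             for j in range(i, l):
--                 n[j] = 9
--             n[i-1] -= 1
--             k = i-1
--             while k > 0:
--                 if n[k] < 0:
--                     n[k-1] -= 1
--                     n[k] = 9
--                 elif n[k] < n[k-1]:
--                     n[k-1] = n[k]
--                     n[k] = 9
--                 k -= 1
--             break
--     if n[0] == 0:
--         n = [9]*(len(n) - 1)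
--     return str(int(''.join([str(c) for c in n])))
-- ===== SOURCE B (Python) =====
-- def solve(n):
--     d = [int(c) for c in str(n)]
--     mark = len(d)
--     for i in range(len(d) - 1, 0, -1):
--         if d[i-1] > d[i]:
--             d[i-1] -= 1
--             mark = i
--     for i in range(mark, len(d)):
--         d[i] = 9
--     return str(int(''.join([str(c) for c in d])))
-- ===== Notes on version B (the rewrite author's own statement) =====
-- stated objective: simpler
-- what changed: Replaces A's first-descent search plus 9-filling inner loop plus backward borrow-cascade (three nested/sequenced loops and a special-case rewrite of the leading digit) by a single right-to-left pass that decrements on each descent and records the leftmost descent position, then one fill of 9s from that mark; the leading-zero case is left to int() instead of A's explicit list replacement.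
-- outside the precondition, e.g. on solve(0): A raises ValueError, B returns '0'
import Mathlib
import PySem

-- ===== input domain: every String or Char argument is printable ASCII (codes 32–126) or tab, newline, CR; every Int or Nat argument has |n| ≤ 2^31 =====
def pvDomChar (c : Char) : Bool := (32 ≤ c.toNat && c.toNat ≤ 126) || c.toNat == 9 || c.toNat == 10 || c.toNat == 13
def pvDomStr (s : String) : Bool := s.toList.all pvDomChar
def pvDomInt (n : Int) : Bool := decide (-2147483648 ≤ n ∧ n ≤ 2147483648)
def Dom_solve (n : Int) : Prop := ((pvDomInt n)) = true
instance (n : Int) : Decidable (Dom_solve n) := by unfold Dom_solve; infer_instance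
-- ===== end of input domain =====

-- B replaces A's first-descent search + 9-fill + backward borrow cascade by one
-- right-to-left decrement pass with a mark, then one 9-fill from the mark (objective: simpler).

-- ===== PORT A =====

-- int(c) for one character c (exact); the .getD 0 default is only reached outside Pre_solve
def pvDval (c : Char) : Int := (PySem.Int.ofChars? [c]).getD 0

-- str(int(''.join([str(c) for c in d]))) — shared tail expression of both Pythons
def pvJoinNum (d : List Int) : String :=
  PySem.Int.toStr ((PySem.Int.ofChars? (PySem.Chars.join [] (d.map PySem.Int.toChars))).getD 0)

-- 'for j in range(i, l): n[j] = 9'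
def pvSet9 (d : List Int) (i l : Int) : List Int :=
  (PySem.List.pyRange i l 1).foldl (fun d j => PySem.List.pySetD d j 9) d

-- 'while k > 0: … ; k -= 1' (k = k'+1; n[k], n[k-1] via getD: indices are in range under Pre_solve)
def pvAWhile (d : List Int) (k : Nat) : List Int :=
  match k with
  | 0 => d
  | Nat.succ k' =>
    let d' :=
      if d.getD (k'+1) 0 < 0 then (d.set k' (d.getD k' 0 - 1)).set (k'+1) 9
      else if d.getD (k'+1) 0 < d.getD k' 0 then (d.set k' (d.getD (k'+1) 0)).set (k'+1) 9
      else d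
    pvAWhile d' k'

-- 'for i in range(1, l): if n[i] < n[i-1]: …; break'
def pvALoop (d : List Int) (i : Nat) : List Int :=
  if _h : i < d.length then
    if d.getD i 0 < d.getD (i-1) 0 then
      let d1 := pvSet9 d (i : Int) (d.length : Int)
      let d2 := d1.set (i-1) (d1.getD (i-1) 0 - 1)
      pvAWhile d2 (i-1)
    else pvALoop d (i+1)
  else d
termination_by d.length - i

def solve (n : Int) : String :=
  let d0 := (PySem.Int.toStr n).toList.map pvDval
  let d1 := pvALoop d0 1
  let d2 := if d1.getD 0 0 = 0 then List.replicate (d1.length - 1) 9 else d1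
  pvJoinNum d2

-- ===== PORT B =====

-- one step of the right-to-left pass: 'if d[i-1] > d[i]: d[i-1] -= 1; mark = i'
def pvBStep (s : List Int × Int) (i : Int) : List Int × Int :=
  if PySem.List.pyGetD s.1 (i-1) 0 > PySem.List.pyGetD s.1 i 0 then
    (PySem.List.pySetD s.1 (i-1) (PySem.List.pyGetD s.1 (i-1) 0 - 1), i)
  else s

def solve_alt (n : Int) : String :=
  let d := (PySem.Int.toStr n).toList.map pvDval
  -- 'for i in range(len(d)-1, 0, -1): …'
  let s := (PySem.List.pyRange ((d.length : Int) - 1) 0 (-1)).foldl pvBStep (d, (d.length : Int))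
  -- 'for i in range(mark, len(d)): d[i] = 9'
  let d2 := (PySem.List.pyRange s.2 (s.1.length : Int) 1).foldl
      (fun d i => PySem.List.pySetD d i 9) s.1
  pvJoinNum d2

-- ===== PRECONDITION & SPEC =====

-- Pre_ excludes n ≤ 0, where A raises ValueError (on n = 0 via int('') after its
-- leading-zero replacement, on negative n because '-' is not a digit).
def Pre_solve (n : Int) : Prop := 1 ≤ n
instance (n : Int) : Decidable (Pre_solve n) := by unfold Pre_solve; infer_instance
def pvWitness_solve : Int := 132

def Spec_solve (n : Int) (out : String) : Prop := out = solve_alt n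
instance (n : Int) (out : String) : Decidable (Spec_solve n out) := by unfold Spec_solve; infer_instance

-- ===== CLAIM (what is proved, stated in full; the proofs are below) =====
def Claim_equal_solve : Prop := ∀ (n : Int), Dom_solve n → Pre_solve n → Spec_solve n (solve n)


-- ===== LEMMAS AND PROOFS =====

-- ---- generic list index/set helpers ----
theorem pvGetD_app_right (p s : List Int) (r : Nat) :
    (p ++ s).getD (p.length + r) 0 = s.getD r 0 := by
  simp [List.getD, List.getElem?_append_right]

theorem pvGetD_app_left (p s : List Int) (j : Nat) (h : j < p.length) :
    (p ++ s).getD j 0 = p.getD j 0 := by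
  exact List.getD_append p s 0 j h

theorem pvSet_app_right (p s : List Int) (r : Nat) (v : Int) :
    (p ++ s).set (p.length + r) v = p ++ s.set r v := by
  rw [List.set_append_right _ _ (by omega)]; simp

theorem pvChain_getD (l : List Int) (h : List.IsChain (· ≤ ·) l) (i : Nat) (h1 : i + 1 < l.length) :
    l.getD i 0 ≤ l.getD (i + 1) 0 := by
  rw [List.getD_eq_getElem _ _ (by omega), List.getD_eq_getElem _ _ (by omega)]
  exact List.isChain_iff_getElem.mp h i (by omega)

theorem pvChain_replicate (a : Int) (q : Nat) :
    List.IsChain (α := Int) (· ≤ ·) (List.replicate q a) := by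
  induction q with
  | zero => simp
  | succ k ih =>
    cases k with
    | zero => simp
    | succ m =>
      rw [List.replicate_succ, List.replicate_succ, List.isChain_cons_cons]
      rw [List.replicate_succ] at ih
      exact ⟨le_refl a, ih⟩

-- ---- digit extraction ----
theorem pvDval_digitChar (d : Nat) (h : d < 10) : pvDval (Nat.digitChar d) = (d : Int) := by
  interval_cases d <;> decide

theorem pvToDigits_vals (m : Nat) (hm : 1 ≤ m) :
    ∃ x xs, (Nat.toDigits 10 m).map pvDval = x :: xs ∧ 1 ≤ x ∧ x ≤ 9 ∧
      ∀ y ∈ xs, 0 ≤ y ∧ y ≤ 9 := by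
  induction m using Nat.strong_induction_on with
  | _ m ih =>
    by_cases h10 : m < 10
    · refine ⟨(m : Int), [], ?_, by omega, by omega, by simp⟩
      rw [Nat.toDigits_of_lt_base h10]
      simp [pvDval_digitChar m h10]
    · rw [Nat.toDigits_eq_if (by omega), if_neg h10, List.map_append]
      obtain ⟨x, xs, heq, h1, h9, hall⟩ := ih (m / 10) (by omega) (by omega)
      refine ⟨x, xs ++ [((m % 10 : Nat) : Int)], ?_, h1, h9, ?_⟩
      · rw [heq]; simp [pvDval_digitChar (m % 10) (by omega)]
      · intro y hy
        rcases List.mem_append.mp hy with h | h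
        · exact hall y h
        · simp at h; subst h
          exact ⟨Int.natCast_nonneg _, by exact_mod_cast (by omega : m % 10 ≤ 9)⟩

theorem pvToDigits_len (m : Nat) (hm : m ≤ 2147483648) : (Nat.toDigits 10 m).length ≤ 10 := by
  rw [Nat.length_toDigits_le_iff (by omega) (by omega)]
  omega

theorem pvToStr_toList (n : Int) (h : 0 ≤ n) :
    (PySem.Int.toStr n).toList = Nat.toDigits 10 n.toNat := by
  rw [PySem.Int.toList_toStr, PySem.Int.toChars, if_neg (by omega)]

theorem pvTake_set_succ (d : List Int) (i : Nat) (h : i < d.length) :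
    (d.set i 9).take (i+1) = d.take i ++ [9] := by
  rw [List.set_eq_take_append_cons_drop, if_pos h, List.take_append]
  simp [List.take_of_length_le, List.length_take, Nat.min_eq_left (Nat.le_of_lt h)]

-- ---- the shared 9-filling loop ----
theorem pvSet9_spec (k : Nat) : ∀ (d : List Int) (i : Nat), i ≤ d.length → d.length - i = k →
    (PySem.List.pyRange (i : Int) (d.length : Int) 1).foldl
        (fun d j => PySem.List.pySetD d j 9) d
      = d.take i ++ List.replicate (d.length - i) 9 := by
  induction k with
  | zero =>
    intro d i hle hk
    have : i = d.length := by omega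
    subst this
    rw [PySem.List.pyRange_one_eq_nil (by omega)]
    simp
  | succ k ih =>
    intro d i hle hk
    have hil : i < d.length := by omega
    rw [PySem.List.pyRange_one_cons (by exact_mod_cast hil), List.foldl_cons]
    simp only [PySem.List.pySetD_natCast]
    have hlen : (d.set i 9).length = d.length := by simp
    have h1 : ((i : Int) + 1) = ((i + 1 : Nat) : Int) := by push_cast; ring
    have h2 : (d.length : Int) = (((d.set i 9).length : Nat) : Int) := by rw [hlen]
    rw [h1, h2, ih (d.set i 9) (i+1) (by omega) (by omega)]
    rw [hlen, pvTake_set_succ d i hil]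
    have : d.length - i = (d.length - (i+1)) + 1 := by omega
    rw [this, List.replicate_succ]
    simp

-- ---- A: the while-k cascade ----
theorem pvGetD_idx (L1 L2 : List Int) (j : Nat) (h : L1.length = j) :
    (L1 ++ L2).getD j 0 = L2.getD 0 0 := by
  subst h; simpa using pvGetD_app_right L1 L2 0
theorem pvSet_idx (L1 L2 : List Int) (j : Nat) (v : Int) (h : L1.length = j) :
    (L1 ++ L2).set j v = L1 ++ L2.set 0 v := by
  subst h; simpa using pvSet_app_right L1 L2 0 v

theorem pvAWhile_succ (d : List Int) (k : Nat) :
    pvAWhile d (k+1) = pvAWhile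
      (if d.getD (k+1) 0 < 0 then (d.set k (d.getD k 0 - 1)).set (k+1) 9
       else if d.getD (k+1) 0 < d.getD k 0 then (d.set k (d.getD (k+1) 0)).set (k+1) 9
       else d) k := rfl

theorem pvAWhile_noop (k : Nat) : ∀ (d : List Int),
    (∀ j : Nat, 1 ≤ j → j ≤ k → d.getD (j-1) 0 ≤ d.getD j 0) →
    (∀ j : Nat, j ≤ k → 0 ≤ d.getD j 0) →
    pvAWhile d k = d := by
  induction k with
  | zero => intro d _ _; rfl
  | succ k ih =>
    intro d h1 h2
    show pvAWhile _ k = d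
    have hnn : ¬ d.getD (k+1) 0 < 0 := not_lt.mpr (h2 (k+1) (by omega))
    have hle : ¬ d.getD (k+1) 0 < d.getD k 0 := by
      have := h1 (k+1) (by omega) (by omega)
      simp only [Nat.add_sub_cancel] at this; omega
    rw [if_neg hnn, if_neg hle]
    exact ih d (fun j hj hjk => h1 j hj (by omega)) (fun j hj => h2 j (by omega))

theorem pvCascade (q : Nat) : ∀ (p : List Int) (a : Int) (suf : List Int),
    List.IsChain (· ≤ ·) (p ++ [a-1]) → (∀ z ∈ p, 0 ≤ z) → 0 ≤ a - 1 →
    pvAWhile (p ++ List.replicate q a ++ [a-1] ++ suf) (p.length + q)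
      = p ++ [a-1] ++ List.replicate q 9 ++ suf := by
  induction q with
  | zero =>
    intro p a suf hch hp ha
    simp only [List.replicate_zero, List.nil_append, List.append_nil]
    apply pvAWhile_noop
    · intro j hj hjk
      have hlt : j < (p ++ [a-1]).length := by simp; omega
      have e1 : (p ++ [a-1] ++ suf).getD (j-1) 0 = (p ++ [a-1]).getD (j-1) 0 :=
        pvGetD_app_left _ _ _ (by simp at hlt ⊢; omega)
      have e2 : (p ++ [a-1] ++ suf).getD j 0 = (p ++ [a-1]).getD j 0 :=
        pvGetD_app_left _ _ _ hlt
      rw [e1, e2]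
      have := pvChain_getD _ hch (j-1) (by simp; omega)
      have hj1 : j - 1 + 1 = j := by omega
      rwa [hj1] at this
    · intro j hj
      have hlt : j < (p ++ [a-1]).length := by simp; omega
      have e2 : (p ++ [a-1] ++ suf).getD j 0 = (p ++ [a-1]).getD j 0 :=
        pvGetD_app_left _ _ _ hlt
      rw [e2]
      rcases Nat.lt_or_ge j p.length with h | h
      · rw [pvGetD_app_left _ _ _ h, List.getD_eq_getElem _ _ h]
        exact hp _ (List.getElem_mem h)
      · have : j = p.length := by omega
        subst this
        have := pvGetD_app_right p [a-1] 0
        simp at this ⊢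
        omega
  | succ q ih =>
    intro p a suf hch hp ha
    have hk : p.length + (q+1) = Nat.succ (p.length + q) := by omega
    rw [hk, show Nat.succ (p.length + q) = (p.length + q) + 1 from rfl, pvAWhile_succ]
    simp only [List.append_assoc]
    have g1 : (p ++ (List.replicate (q+1) a ++ ([a-1] ++ suf))).getD (p.length + q + 1) 0 = a - 1 := by
      rw [show p.length + q + 1 = p.length + (q+1) by omega, pvGetD_app_right,
        pvGetD_idx _ _ _ (by simp)]
      rfl
    have g2 : (p ++ (List.replicate (q+1) a ++ ([a-1] ++ suf))).getD (p.length + q) 0 = a := by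
      rw [pvGetD_app_right]
      rw [List.getD_eq_getElem _ _ (by simp; omega), List.getElem_append_left (by simp)]
      simp
    rw [g1, g2, if_neg (by omega), if_pos (by omega)]
    have s1 : (p ++ (List.replicate (q+1) a ++ ([a-1] ++ suf))).set (p.length + q) (a-1)
        = p ++ (List.replicate q a ++ ([a-1] ++ ([a-1] ++ suf))) := by
      rw [pvSet_app_right, List.replicate_succ', List.append_assoc,
        pvSet_idx _ _ _ _ (by simp)]
      simp
    rw [s1]
    have s2 : (p ++ (List.replicate q a ++ ([a-1] ++ ([a-1] ++ suf)))).set (p.length + q + 1) 9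
        = p ++ (List.replicate q a ++ ([a-1] ++ (9 :: suf))) := by
      rw [show (p ++ (List.replicate q a ++ ([a-1] ++ ([a-1] ++ suf))))
            = (p ++ List.replicate q a ++ [a-1]) ++ ([a-1] ++ suf) by simp,
        pvSet_idx _ _ _ _ (by simp; omega)]
      simp
    rw [s2]
    have := ih p a (9 :: suf) hch hp ha
    simp only [List.append_assoc] at this
    rw [this]
    simp [List.replicate_succ']

-- ---- A: the outer search loop ----
theorem pvALoop_stop (d : List Int) (i : Nat) (h : ¬ i < d.length) : pvALoop d i = d := by
  rw [pvALoop, dif_neg h]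

theorem pvALoop_step_no (d : List Int) (i : Nat) (h : i < d.length)
    (hn : ¬ d.getD i 0 < d.getD (i-1) 0) : pvALoop d i = pvALoop d (i+1) := by
  rw [pvALoop, dif_pos h, if_neg hn]

theorem pvALoop_hit (d : List Int) (i : Nat) (h : i < d.length)
    (hd : d.getD i 0 < d.getD (i-1) 0) :
    pvALoop d i = pvAWhile ((pvSet9 d (i : Int) (d.length : Int)).set (i-1)
      ((pvSet9 d (i : Int) (d.length : Int)).getD (i-1) 0 - 1)) (i-1) := by
  rw [pvALoop, dif_pos h, if_pos hd]

theorem pvALoop_nodesc (k : Nat) : ∀ (d : List Int) (i : Nat), 1 ≤ i → d.length - i = k →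
    (∀ j : Nat, i ≤ j → j < d.length → ¬ d.getD j 0 < d.getD (j-1) 0) →
    pvALoop d i = d := by
  induction k with
  | zero =>
    intro d i _ hk _
    exact pvALoop_stop d i (by omega)
  | succ k ih =>
    intro d i hi hk hno
    rw [pvALoop_step_no d i (by omega) (hno i (le_refl i) (by omega))]
    exact ih d (i+1) (by omega) (by omega) (fun j hj hjl => hno j (by omega) hjl)

theorem pvALoop_advance (k : Nat) : ∀ (d : List Int) (i i0 : Nat), 1 ≤ i → i ≤ i0 → i0 - i = k →
    (∀ j : Nat, i ≤ j → j < i0 → ¬ d.getD j 0 < d.getD (j-1) 0) →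
    pvALoop d i = pvALoop d i0 := by
  induction k with
  | zero =>
    intro d i i0 _ _ hk _
    have : i = i0 := by omega
    rw [this]
  | succ k ih =>
    intro d i i0 hi hle hk hno
    by_cases hl : i < d.length
    · rw [pvALoop_step_no d i hl (hno i (le_refl i) (by omega))]
      exact ih d (i+1) i0 (by omega) (by omega) (by omega) (fun j hj hjl => hno j (by omega) hjl)
    · rw [pvALoop_stop d i hl, pvALoop_stop d i0 (by omega)]

theorem pvA_main (p : List Int) (q : Nat) (a b : Int) (t : List Int)
    (hch : List.IsChain (· ≤ ·) (p ++ List.replicate (q+1) a))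
    (hlast : ∀ z, p.getLast? = some z → z < a) (hb : b < a)
    (hnn : ∀ x ∈ (p ++ List.replicate (q+1) a ++ b :: t), 0 ≤ x) :
    pvALoop (p ++ List.replicate (q+1) a ++ b :: t) 1
      = p ++ [a-1] ++ List.replicate (q + 1 + t.length) 9 := by
  have hP : (p ++ List.replicate (q+1) a).length = p.length + q + 1 := by simp; omega
  have hlen : (p ++ List.replicate (q+1) a ++ b :: t).length = p.length + q + 2 + t.length := by
    simp; omega
  have hadv : pvALoop (p ++ List.replicate (q+1) a ++ b :: t) 1
      = pvALoop (p ++ List.replicate (q+1) a ++ b :: t) (p.length + q + 1) := by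
    apply pvALoop_advance (p.length + q) _ 1 (p.length + q + 1) (by omega) (by omega) (by omega)
    intro j h1 h2
    rw [pvGetD_app_left (p ++ List.replicate (q+1) a) (b :: t) j (by omega),
      pvGetD_app_left (p ++ List.replicate (q+1) a) (b :: t) (j-1) (by omega)]
    have hc := pvChain_getD _ hch (j-1) (by omega)
    have hj : j - 1 + 1 = j := by omega
    rw [hj] at hc
    omega
  have hb2 : (p ++ List.replicate (q+1) a ++ b :: t).getD (p.length + q + 1) 0 = b := by
    rw [pvGetD_idx (p ++ List.replicate (q+1) a) (b :: t) _ (by omega)]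
    rfl
  have ha2 : (p ++ List.replicate (q+1) a ++ b :: t).getD (p.length + q) 0 = a := by
    rw [pvGetD_app_left (p ++ List.replicate (q+1) a) (b :: t) _ (by omega),
      pvGetD_app_right p _ q, List.getD_eq_getElem _ _ (by simp)]
    simp
  have hhit := pvALoop_hit (p ++ List.replicate (q+1) a ++ b :: t) (p.length + q + 1) (by omega)
    (by rw [hb2, show p.length + q + 1 - 1 = p.length + q from rfl, ha2]; exact hb)
  have hset : pvSet9 (p ++ List.replicate (q+1) a ++ b :: t) ((p.length + q + 1 : Nat) : Int)
        (((p ++ List.replicate (q+1) a ++ b :: t).length : Nat) : Int)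
      = (p ++ List.replicate (q+1) a) ++ List.replicate (t.length + 1) 9 := by
    rw [pvSet9, pvSet9_spec ((p ++ List.replicate (q+1) a ++ b :: t).length - (p.length + q + 1))
      _ (p.length + q + 1) (by omega) rfl]
    congr 1
    · rw [show p.length + q + 1 = (p ++ List.replicate (q+1) a).length by omega, List.take_left]
    · congr 1; omega
  have hga : ((p ++ List.replicate (q+1) a) ++ List.replicate (t.length + 1) 9).getD
      (p.length + q) 0 = a := by
    rw [pvGetD_app_left (p ++ List.replicate (q+1) a) _ _ (by omega),
      pvGetD_app_right p _ q, List.getD_eq_getElem _ _ (by simp)]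
    simp
  have hd2 : ((p ++ List.replicate (q+1) a) ++ List.replicate (t.length + 1) 9).set
        (p.length + q) (a - 1)
      = p ++ List.replicate q a ++ [a-1] ++ List.replicate (t.length + 1) 9 := by
    rw [List.append_assoc, pvSet_app_right p _ q, List.replicate_succ',
      List.append_assoc, pvSet_idx _ _ _ _ (by simp)]
    simp
  have hchp : List.IsChain (· ≤ ·) (p ++ [a-1]) := by
    rw [List.isChain_append]
    refine ⟨(List.isChain_append.mp hch).1, by simp, ?_⟩
    intro x hx y hy
    simp at hy
    subst hy
    have := hlast x (by simpa using hx)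
    omega
  have hnn_p : ∀ z ∈ p, 0 ≤ z := fun z hz => hnn z (by simp [hz])
  have hb_nn : 0 ≤ b := hnn b (by simp)
  have hcas := pvCascade q p a (List.replicate (t.length + 1) 9) hchp hnn_p (by omega)
  rw [hadv, hhit, show p.length + q + 1 - 1 = p.length + q from rfl, hset, hga, hd2, hcas]
  rw [List.append_assoc (p ++ [a-1]), ← List.replicate_add,
    show q + (t.length + 1) = q + 1 + t.length by omega]

theorem pvA_chain (d : List Int) (h : List.IsChain (· ≤ ·) d) : pvALoop d 1 = d := by
  apply pvALoop_nodesc (d.length - 1) d 1 (by omega) rfl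
  intro j h1 h2
  have hc := pvChain_getD d h (j-1) (by omega)
  have hj : j - 1 + 1 = j := by omega
  rw [hj] at hc
  omega

-- ---- B: the right-to-left scan ----
def pvBScan (s : List Int × Int) (i : Int) : List Int × Int :=
  (PySem.List.pyRange i 0 (-1)).foldl pvBStep s

theorem pvBScan_stop (s : List Int × Int) (i : Int) (h : i ≤ 0) : pvBScan s i = s := by
  rw [pvBScan, PySem.List.pyRange_neg_one_eq_nil h]; rfl

theorem pvBScan_step (s : List Int × Int) (i : Int) (h : 0 < i) :
    pvBScan s i = pvBScan (pvBStep s i) (i - 1) := by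
  rw [pvBScan, PySem.List.pyRange_neg_one_cons h]; rfl

theorem pvBStep_eq (d : List Int) (m : Int) (j : Nat) (hj : 1 ≤ j) :
    pvBStep (d, m) ((j : Nat) : Int)
      = if d.getD (j-1) 0 > d.getD j 0
          then (d.set (j-1) (d.getD (j-1) 0 - 1), ((j : Nat) : Int)) else (d, m) := by
  have hc : ((j : Nat) : Int) - 1 = ((j - 1 : Nat) : Int) := by push_cast [hj]; ring
  rw [pvBStep]
  simp only [hc, PySem.List.pyGetD_natCast, PySem.List.pySetD_natCast]

theorem pvBScan_noop (i : Nat) : ∀ (d : List Int) (m : Int),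
    (∀ j : Nat, 1 ≤ j → j ≤ i → ¬ d.getD (j-1) 0 > d.getD j 0) →
    pvBScan (d, m) (i : Int) = (d, m) := by
  induction i with
  | zero => intro d m _; exact pvBScan_stop _ _ (by omega)
  | succ i ih =>
    intro d m h
    rw [pvBScan_step _ _ (by omega), pvBStep_eq d m (i+1) (by omega),
      if_neg (h (i+1) (by omega) (by omega))]
    rw [show ((i + 1 : Nat) : Int) - 1 = ((i : Nat) : Int) by push_cast; ring]
    exact ih d m (fun j hj hji => h j hj (by omega))

theorem pvBScan_suffix (r : Nat) : ∀ (pre : List Int) (b : Int) (u : List Int) (m : Int),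
    r ≤ u.length →
    ∃ e u' m', pvBScan (pre ++ b :: u, m) ((pre.length + r : Nat) : Int)
        = pvBScan (pre ++ e :: u', m') ((pre.length : Nat) : Int)
      ∧ (e = b ∨ e = b - 1) ∧ u'.length = u.length := by
  induction r with
  | zero => intro pre b u m _; exact ⟨b, u, m, by simp, Or.inl rfl, rfl⟩
  | succ r ih =>
    intro pre b u m hr
    rw [pvBScan_step _ _ (by push_cast; omega), pvBStep_eq _ m (pre.length + (r+1)) (by omega),
      show ((pre.length + (r+1) : Nat) : Int) - 1 = ((pre.length + r : Nat) : Int) by push_cast; ring,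
      show pre.length + (r+1) - 1 = pre.length + r from by omega,
      show (pre ++ b :: u).getD (pre.length + r) 0 = (b :: u).getD r 0 from
        pvGetD_app_right pre (b :: u) r,
      show (pre ++ b :: u).getD (pre.length + (r+1)) 0 = (b :: u).getD (r+1) 0 from
        pvGetD_app_right pre (b :: u) (r+1),
      pvSet_app_right pre (b :: u) r _]
    by_cases hcond : (b :: u).getD r 0 > (b :: u).getD (r+1) 0
    · rw [if_pos hcond]
      cases r with
      | zero =>
        exact ⟨b - 1, u, ((pre.length + (0+1) : Nat) : Int), by simp, Or.inr rfl, rfl⟩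
      | succ r' =>
        have hset : (b :: u).set (r'+1) ((b :: u).getD (r'+1) 0 - 1)
            = b :: u.set r' ((b :: u).getD (r'+1) 0 - 1) := by simp
        rw [hset]
        obtain ⟨e, u', m', heq, he, hl⟩ := ih pre b (u.set r' ((b :: u).getD (r'+1) 0 - 1))
          ((pre.length + (r'+1+1) : Nat) : Int) (by simp; omega)
        exact ⟨e, u', m', heq, he, by simpa using hl⟩
    · rw [if_neg hcond]
      exact ih pre b u m (by omega)

theorem pvBScan_run (p : List Int) (a : Int) (hch : List.IsChain (· ≤ ·) (p ++ [a-1]))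
    (q : Nat) : ∀ (e : Int) (g : List Int) (m : Int), e < a →
    pvBScan (p ++ List.replicate q a ++ [a] ++ e :: g, m) ((p.length + q + 1 : Nat) : Int)
      = (p ++ [a-1] ++ List.replicate q (a-1) ++ e :: g, ((p.length + 1 : Nat) : Int)) := by
  induction q with
  | zero =>
    intro e g m he
    rw [pvBScan_step _ _ (by push_cast; omega), pvBStep_eq _ m (p.length + 0 + 1) (by omega),
      show p.length + 0 + 1 - 1 = p.length from by omega]
    have hg1 : (p ++ List.replicate 0 a ++ [a] ++ e :: g).getD p.length 0 = a := by
      simp only [List.replicate_zero, List.nil_append, List.append_nil]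
      rw [show p ++ [a] ++ e :: g = p ++ ([a] ++ e :: g) by simp, pvGetD_idx p _ _ rfl]
      rfl
    have hg2 : (p ++ List.replicate 0 a ++ [a] ++ e :: g).getD (p.length + 0 + 1) 0 = e := by
      simp only [List.replicate_zero, List.nil_append, List.append_nil]
      rw [pvGetD_idx (p ++ [a]) _ _ (by simp)]
      rfl
    rw [hg1, hg2, if_pos (by omega),
      show ((p.length + 0 + 1 : Nat) : Int) - 1 = ((p.length : Nat) : Int) by push_cast; ring]
    have hs : (p ++ List.replicate 0 a ++ [a] ++ e :: g).set p.length (a - 1)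
        = p ++ [a-1] ++ List.replicate 0 (a-1) ++ e :: g := by
      simp only [List.replicate_zero, List.nil_append, List.append_nil]
      rw [show p ++ [a] ++ e :: g = p ++ ([a] ++ e :: g) by simp, pvSet_idx p _ _ _ rfl]
      simp
    rw [hs]
    rw [pvBScan_noop p.length _ _ ?hnoop]
    case hnoop =>
      intro j hj hjl
      have h1 : (p ++ [a-1] ++ List.replicate 0 (a-1) ++ e :: g).getD (j-1) 0
          = (p ++ [a-1]).getD (j-1) 0 := by
        rw [show p ++ [a-1] ++ List.replicate 0 (a-1) ++ e :: g = (p ++ [a-1]) ++ (List.replicate 0 (a-1) ++ e :: g) by simp]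
        exact pvGetD_app_left _ _ _ (by simp; omega)
      have h2 : (p ++ [a-1] ++ List.replicate 0 (a-1) ++ e :: g).getD j 0
          = (p ++ [a-1]).getD j 0 := by
        rw [show p ++ [a-1] ++ List.replicate 0 (a-1) ++ e :: g = (p ++ [a-1]) ++ (List.replicate 0 (a-1) ++ e :: g) by simp]
        exact pvGetD_app_left _ _ _ (by simp; omega)
      rw [h1, h2]
      have hc := pvChain_getD _ hch (j-1) (by simp; omega)
      have hj1 : j - 1 + 1 = j := by omega
      rw [hj1] at hc
      omega
  | succ q ih =>
    intro e g m he
    rw [pvBScan_step _ _ (by push_cast; omega), pvBStep_eq _ m (p.length + (q+1) + 1) (by omega),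
      show p.length + (q+1) + 1 - 1 = p.length + q + 1 from by omega]
    have hg1 : (p ++ List.replicate (q+1) a ++ [a] ++ e :: g).getD (p.length + q + 1) 0 = a := by
      rw [show p ++ List.replicate (q+1) a ++ [a] ++ e :: g
          = (p ++ List.replicate (q+1) a) ++ ([a] ++ e :: g) by simp,
        pvGetD_idx _ _ _ (by simp; omega)]
      rfl
    have hg2 : (p ++ List.replicate (q+1) a ++ [a] ++ e :: g).getD (p.length + (q+1) + 1) 0 = e := by
      rw [show p ++ List.replicate (q+1) a ++ [a] ++ e :: g
          = (p ++ List.replicate (q+1) a ++ [a]) ++ (e :: g) by simp,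
        pvGetD_idx _ _ _ (by simp; omega)]
      rfl
    rw [hg1, hg2, if_pos (by omega),
      show ((p.length + (q+1) + 1 : Nat) : Int) - 1 = ((p.length + q + 1 : Nat) : Int) by push_cast; ring]
    have hs : (p ++ List.replicate (q+1) a ++ [a] ++ e :: g).set (p.length + q + 1) (a - 1)
        = p ++ List.replicate q a ++ [a] ++ (a-1) :: e :: g := by
      rw [show p ++ List.replicate (q+1) a ++ [a] ++ e :: g
          = (p ++ List.replicate (q+1) a) ++ ([a] ++ e :: g) by simp,
        pvSet_idx _ _ _ _ (by simp; omega)]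
      rw [List.replicate_succ']
      simp
    rw [hs, ih (a-1) (e :: g) ((p.length + (q+1) + 1 : Nat) : Int) (by omega)]
    simp [List.replicate_succ']

-- ---- decomposition by the first descent ----
-- from the chain on the non-decreasing prefix to the chain the cascade needs
theorem pvChainP (p : List Int) (q : Nat) (a : Int)
    (hch : List.IsChain (· ≤ ·) (p ++ List.replicate (q+1) a))
    (hlast : ∀ z, p.getLast? = some z → z < a) :
    List.IsChain (· ≤ ·) (p ++ [a-1]) := by
  rw [List.isChain_append]
  refine ⟨(List.isChain_append.mp hch).1, by simp, ?_⟩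
  intro x hx y hy
  simp at hy
  subst hy
  have := hlast x (by simpa using hx)
  omega

-- the B-side middle computation of solve_alt, named for the proofs
def pvBMiddle (d : List Int) : List Int :=
  (PySem.List.pyRange (pvBScan (d, (d.length : Int)) ((d.length : Int) - 1)).2
      ((pvBScan (d, (d.length : Int)) ((d.length : Int) - 1)).1.length : Int) 1).foldl
    (fun d i => PySem.List.pySetD d i 9) (pvBScan (d, (d.length : Int)) ((d.length : Int) - 1)).1

theorem pvB_chain (d : List Int) (hne : d ≠ []) (hch : List.IsChain (· ≤ ·) d) :
    pvBMiddle d = d := by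
  have hl : 1 ≤ d.length := List.length_pos_of_ne_nil hne
  have hcast : ((d.length : Int) - 1) = ((d.length - 1 : Nat) : Int) := by push_cast [hl]; ring
  have hno : pvBScan (d, (d.length : Int)) ((d.length : Int) - 1) = (d, (d.length : Int)) := by
    rw [hcast]
    apply pvBScan_noop
    intro j hj hji
    have hc := pvChain_getD d hch (j-1) (by omega)
    have hj1 : j - 1 + 1 = j := by omega
    rw [hj1] at hc
    omega
  rw [pvBMiddle, hno, PySem.List.pyRange_one_eq_nil (by simp)]
  rfl

theorem pvB_main (p : List Int) (q : Nat) (a b : Int) (t : List Int)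
    (hch : List.IsChain (· ≤ ·) (p ++ List.replicate (q+1) a))
    (hlast : ∀ z, p.getLast? = some z → z < a) (hb : b < a) :
    pvBMiddle (p ++ List.replicate (q+1) a ++ b :: t)
      = p ++ [a-1] ++ List.replicate (q + 1 + t.length) 9 := by
  have hchp := pvChainP p q a hch hlast
  have hlen : (p ++ List.replicate (q+1) a ++ b :: t).length = p.length + q + 2 + t.length := by
    simp; omega
  have hcast : (((p ++ List.replicate (q+1) a ++ b :: t).length : Int) - 1)
      = (((p ++ List.replicate (q+1) a).length + t.length : Nat) : Int) := by
    simp; omega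
  obtain ⟨e, u', m', heq, he, hul⟩ :=
    pvBScan_suffix t.length (p ++ List.replicate (q+1) a) b t
      (((p ++ List.replicate (q+1) a ++ b :: t).length : Int)) (le_refl _)
  have hrun := pvBScan_run p a hchp q e u' m' (by omega)
  have hscan : pvBScan (p ++ List.replicate (q+1) a ++ b :: t,
        ((p ++ List.replicate (q+1) a ++ b :: t).length : Int))
        (((p ++ List.replicate (q+1) a ++ b :: t).length : Int) - 1)
      = (p ++ [a-1] ++ List.replicate q (a-1) ++ e :: u', ((p.length + 1 : Nat) : Int)) := by
    rw [hcast, heq,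
      show ((p ++ List.replicate (q+1) a).length : Nat) = p.length + q + 1 by simp; omega,
      show p ++ List.replicate (q+1) a ++ e :: u'
        = p ++ List.replicate q a ++ [a] ++ e :: u' by simp [List.replicate_succ'],
      hrun]
  rw [pvBMiddle, hscan]
  have hl2 : (p ++ [a-1] ++ List.replicate q (a-1) ++ e :: u').length
      = p.length + q + 2 + t.length := by simp [hul]; omega
  rw [pvSet9_spec ((p ++ [a-1] ++ List.replicate q (a-1) ++ e :: u').length - (p.length + 1))
    _ (p.length + 1) (by omega) rfl]
  congr 1
  · rw [show p ++ [a-1] ++ List.replicate q (a-1) ++ e :: u'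
        = (p ++ [a-1]) ++ (List.replicate q (a-1) ++ e :: u') by simp,
      show p.length + 1 = (p ++ [a-1]).length by simp, List.take_left]
  · rw [hl2]
    congr 1
    omega

theorem pvDecomp (ds : List Int) :
    List.IsChain (· ≤ ·) ds ∨
    ∃ p q a b t, ds = p ++ List.replicate (q+1) a ++ b :: t ∧
      List.IsChain (· ≤ ·) (p ++ List.replicate (q+1) a) ∧
      (∀ z, p.getLast? = some z → z < a) ∧ b < a := by
  induction ds with
  | nil => left; simp
  | cons x ds ih =>
    rcases ih with hch | ⟨p, q, a, b, t, heq, hch2, hlast, hb⟩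
    · cases ds with
      | nil => left; simp
      | cons y t =>
        by_cases hxy : x ≤ y
        · left; exact List.isChain_cons_cons.mpr ⟨hxy, hch⟩
        · right
          exact ⟨[], 0, x, y, t, by simp, by simp, by simp, by omega⟩
    · subst heq
      cases p with
      | nil =>
        simp only [List.nil_append] at hch2 ⊢
        by_cases hxa : x = a
        · right
          refine ⟨[], q+1, a, b, t, ?_, ?_, by simp, hb⟩
          · subst hxa; simp [List.replicate_succ]
          · simpa using pvChain_replicate a (q+2)
        · by_cases hlt : x < a
          · right
            refine ⟨[x], q, a, b, t, by simp, ?_, by simp [hlt], hb⟩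
            rw [show [x] ++ List.replicate (q+1) a = x :: List.replicate (q+1) a by simp]
            refine hch2.cons ?_
            intro y hy
            rw [List.head?_replicate] at hy
            simp at hy
            omega
          · right
            refine ⟨[], 0, x, a, List.replicate q a ++ b :: t, ?_, by simp, by simp, by omega⟩
            simp [List.replicate_succ]
      | cons z p' =>
        by_cases hxz : x ≤ z
        · right
          refine ⟨x :: z :: p', q, a, b, t, by simp, ?_, ?_, hb⟩
          · rw [show (x :: z :: p') ++ List.replicate (q+1) a
                = x :: ((z :: p') ++ List.replicate (q+1) a) by simp]
            refine hch2.cons ?_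
            intro y hy
            simp at hy
            omega
          · intro w hw
            rw [List.getLast?_cons_cons] at hw
            exact hlast w hw
        · right
          refine ⟨[], 0, x, z, p' ++ List.replicate (q+1) a ++ b :: t, by simp, by simp,
            by simp, by omega⟩

-- ---- final join for the leading-zero case ----
theorem pvJoin_zero (s : Nat) (h1 : 1 ≤ s) (h9 : s ≤ 9) :
    pvJoinNum (0 :: List.replicate s 9) = pvJoinNum (List.replicate s 9) := by
  interval_cases s <;> decide

-- ===== VERDICT (by name: the statement is the Claim_ definition above) =====
theorem solve_spec : Claim_equal_solve := by
  intro n hdom hpre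
  have hn1 : 1 ≤ n := hpre
  have hn2 : n ≤ 2147483648 := by
    unfold Dom_solve pvDomInt at hdom
    simp at hdom
    omega
  show solve n = solve_alt n
  have hm1 : 1 ≤ n.toNat := by omega
  have hm2 : n.toNat ≤ 2147483648 := by omega
  have hdl : (PySem.Int.toStr n).toList = Nat.toDigits 10 n.toNat := pvToStr_toList n (by omega)
  obtain ⟨x, xs, hxs, hx1, hx9, hxsb⟩ := pvToDigits_vals n.toNat hm1
  have hlen10 : ((Nat.toDigits 10 n.toNat).map pvDval).length ≤ 10 := by
    rw [List.length_map]
    exact pvToDigits_len n.toNat hm2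
  have hA0 : solve n
      = pvJoinNum (if (pvALoop ((PySem.Int.toStr n).toList.map pvDval) 1).getD 0 0 = 0
          then List.replicate ((pvALoop ((PySem.Int.toStr n).toList.map pvDval) 1).length - 1) 9
          else pvALoop ((PySem.Int.toStr n).toList.map pvDval) 1) := rfl
  have hB0 : solve_alt n = pvJoinNum (pvBMiddle ((PySem.Int.toStr n).toList.map pvDval)) := rfl
  rw [hA0, hB0, hdl]
  have hnn : ∀ y ∈ (Nat.toDigits 10 n.toNat).map pvDval, 0 ≤ y := by
    rw [hxs]
    intro y hy
    rcases List.mem_cons.mp hy with h | h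
    · omega
    · exact (hxsb y h).1
  rcases pvDecomp ((Nat.toDigits 10 n.toNat).map pvDval) with hch | ⟨p, q, a, b, t, heq, hch2, hlast, hb⟩
  · -- already non-decreasing: both sides leave the digits unchanged
    rw [pvA_chain _ hch, pvB_chain _ (by rw [hxs]; simp) hch, if_neg (by rw [hxs]; simp; omega)]
  · rw [heq] at hnn ⊢
    rw [pvA_main p q a b t hch2 hlast hb hnn, pvB_main p q a b t hch2 hlast hb]
    have hslen : ((p ++ List.replicate (q+1) a ++ b :: t).length) ≤ 10 := heq ▸ hlen10
    cases p with
    | cons z p' =>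
      -- the result keeps A's (nonzero) leading digit: the branch does not fire
      have hz : z = x := by
        have : z :: (p' ++ List.replicate (q+1) a ++ b :: t) = x :: xs := by
          simpa using heq.symm.trans hxs
        exact (List.cons.injEq _ _ _ _ ▸ this).1
      rw [if_neg (by simp; omega)]
    | nil =>
      have hax : a = x := by
        have : a :: (List.replicate q a ++ b :: t) = x :: xs := by
          rw [← hxs, heq]
          simp [List.replicate_succ]
        exact (List.cons.injEq _ _ _ _ ▸ this).1
      simp only [List.nil_append]
      by_cases ha1 : a - 1 = 0
      · rw [if_pos (by simp [ha1])]
        have hs9 : ([a-1] ++ List.replicate (q + 1 + t.length) 9).length - 1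
            = q + 1 + t.length := by simp
        rw [hs9, ha1]
        have hle9 : q + 1 + t.length ≤ 9 := by
          simp at hslen
          omega
        exact (pvJoin_zero (q + 1 + t.length) (by omega) hle9).symm
      · rw [if_neg (by simp [ha1])]
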